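/- PORTED by tools/port_fixed.py from Prog/Jsmn/S/PrimExit.lean to THE FIXED IMAGE fixed/jsmn_s.bin (same bytes at the same addresses; binFS). Do not edit: edit the original and port again. -/
/-
  jsmn_s.bin: `jsmn_parse_primitive`, second part: the exits.
    prim_tail        10013AH: pop rbx ; pop rbp ; pop r12 ; ret                                    (4 instructions)
    prim_inval       10012AH: parser->pos = start ; return JSMN_ERROR_INVAL                        (3)
    prim_part        100133H: parser->pos = start ; return JSMN_ERROR_PART                         (2)
    prim_count       1000E8H with tokens == NULL: parser->pos-- ; return 0                         (2 + 4)
    prim_nomem       1000FBH with rax = NULL: parser->pos = start ; return JSMN_ERROR_NOMEM        (3 + 3)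
    prim_dec         100114H (after jsmn_fill_token): token->parent = parser->toksuper ; parser->pos-- ; return 0      (7)
-/
import Prog.Jsmn.Fixed.Specs
import Prog.Jsmn.Fixed.CodeFS
import Prog.Jsmn.Fixed.S.PrimLoop
namespace X86
namespace J6
namespace FS
open X86.User (CodeAt RegsKept Span FlagsOK Layout toNat_add_ofNat toNat_ofNat_lt' add_ofNat_add)
open Jsmn JsmnFSBytes

set_option maxRecDepth 100000
set_option maxHeartbeats 4000000
set_option linter.unusedSimpArgs false
set_option linter.unusedVariables false

variable {n : User.Layout} {v0 : User.State} {ret pa jsA tb : Word} {js : List UInt8} {numTokens : Nat} {p pc : Parser} {toks tc : Option Tokens}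

/-- The epilogue: with the result in eax and the final model state in memory, pop the three saved registers and return. -/
theorem prim_tail (hp : ScanPre binFS n binFS.prim binFS.usePrim v0 ret pa jsA tb js numTokens p toks) {r : Int} {v : User.State}
    (hrip : v.rip = 0x10013a) (hrax : v.reg .rax = UInt64.ofNat (u32 r)) (hf : PrimFrame v0 ret pa tb numTokens p toks pc tc v) :
    Reach n v (ScanPost binFS binFS.usePrim v0 ret pa tb numTokens toks r pc tc) := by
  v3_open hp.call hf
  j6f_bin
  have hcode := JsmnFS.tjfs_jsmn_parse_primitive_code hf_img
  v3_walk hcode hp.call.fetch [hf_retA, hp_call_retlt]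
  refine Reach.done ⟨⟨by simp, by simp, calleeSaved_of_six (by v3_regnorm) (by v3_regnorm) (by v3_regnorm) (by v3_regnorm; exact hf_r13)
    (by v3_regnorm; exact hf_r14) (by v3_regnorm; exact hf_r15), ?_⟩, ?_, ?_, ?_⟩
  · unfold dataWins; v3_memnorm; rw [binFS_cfg]; exact hf_same
  · unfold RetInt; v3_regnorm; exact hrax
  · v3_memnorm; exact hf.parser
  · v3_memnorm; rw [binFS_cfg]; exact hf_toksArg

set_option hygiene false in
/-- `PrimFrame` for a view reached from `v` (with `v3_open hf` done) by stores into the parser struct: everything but the `parser` field. -/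
macro "prims_frame_f" : tactic => `(tactic|
  refine ⟨by v3_regnorm; exact hf_rbx, by v3_regnorm; exact hf_rbp, by v3_regnorm; exact hf_rsp, by v3_regnorm; exact hf_r13,
    by v3_regnorm; exact hf_r14, by v3_regnorm; exact hf_r15, by v3_frame hf_slotR12, by v3_frame hf_slotRbp, by v3_frame hf_slotRbx, by v3_frame hf_retA,
    by v3_frame hf_img, ?_, by v3_frame hf_toksArg, hf.tcb, by v3_same⟩)

/-- A character out of range: `parser->pos = start; return JSMN_ERROR_INVAL`. -/
theorem prim_inval (hp : ScanPre binFS n binFS.prim binFS.usePrim v0 ret pa jsA tb js numTokens p toks) {q : Nat} {v : User.State}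
    (hrip : v.rip = 0x10012a) (hf : PrimFrame v0 ret pa tb numTokens p toks { p with pos := q } toks v) :
    Reach n v (ScanPost binFS binFS.usePrim v0 ret pa tb numTokens toks JSMN_ERROR_INVAL p toks) := by
  have hW := hp.toksW
  v3_open hp hf hW
  j6f_bin
  have hcode := JsmnFS.tjfs_jsmn_parse_primitive_code hf_img
  have hplt : p.pos < 2 ^ 32 := hp_parser_pos ▸ User.Mem.readLE4_lt _ _
  v3_walk hcode hp.call.fetch [] until [0x10013a]
  refine prim_tail hp (by simp) (by v3_regnorm; rfl) ?_
  prims_frame_f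
  exact ⟨by v3_read, by v3_frame hf_parser_toknext, by v3_frame hf_parser_toksuper⟩

/-- The loop test failed (end of the text or a NUL): in strict mode `parser->pos = start; return JSMN_ERROR_PART`. -/
theorem prim_part (hp : ScanPre binFS n binFS.prim binFS.usePrim v0 ret pa jsA tb js numTokens p toks) {q : Nat} {v : User.State}
    (hrip : v.rip = 0x100133) (hf : PrimFrame v0 ret pa tb numTokens p toks { p with pos := q } toks v) :
    Reach n v (ScanPost binFS binFS.usePrim v0 ret pa tb numTokens toks JSMN_ERROR_PART p toks) := by
  have hW := hp.toksW
  v3_open hp hf hW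
  j6f_bin
  have hcode := JsmnFS.tjfs_jsmn_parse_primitive_code hf_img
  have hplt : p.pos < 2 ^ 32 := hp_parser_pos ▸ User.Mem.readLE4_lt _ _
  v3_walk hcode hp.call.fetch [] until [0x10013a]
  refine prim_tail hp (by simp) (by v3_regnorm; rfl) ?_
  prims_frame_f
  exact ⟨by v3_read, by v3_frame hf_parser_toknext, by v3_frame hf_parser_toksuper⟩

/-- Counting mode (`tokens == NULL`): `parser->pos--; return 0`. -/
theorem prim_count (hp : ScanPre binFS n binFS.prim binFS.usePrim v0 ret pa jsA tb js numTokens p none) {q : Nat} {v : User.State}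
    (hrip : v.rip = 0x1000e8) (hf : PrimFrame v0 ret pa tb numTokens p none { p with pos := q } none v) (hr : PrimRegs jsA tb js numTokens v)
    (hrax : v.reg .rax = UInt64.ofNat q) :
    Reach n v (ScanPost binFS binFS.usePrim v0 ret pa tb numTokens none 0 { p with pos := u32 ((q : Int) - 1) } none) := by
  have hW := hp.toksW
  v3_open hp hf hr hW
  j6f_bin
  have hcode := JsmnFS.tjfs_jsmn_parse_primitive_code hf_img
  have hqlt : q < 2 ^ 32 := hf_parser_pos ▸ User.Mem.readLE4_lt _ _
  have htb : tb = 0 := hf_toksArg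
  v3_walk hcode hp.call.fetch [] until [0x10013a]
  have hpos : u32 ((q : Int) - 1) = (Word.low .w32 (UInt64.ofNat q - 1)).toNat := by unfold u32; v3_omega
  refine prim_tail hp (by simp) (by v3_regnorm; rfl) ?_
  prims_frame_f
  exact ⟨by rw [hpos]; v3_read, by v3_frame hf_parser_toknext, by v3_frame hf_parser_toksuper⟩

/-- No room for the token (`jsmn_alloc_token` returned NULL): `parser->pos = start; return JSMN_ERROR_NOMEM`. -/
theorem prim_nomem (hp : ScanPre binFS n binFS.prim binFS.usePrim v0 ret pa jsA tb js numTokens p toks) {q : Nat} {v : User.State}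
    (hrip : v.rip = 0x1000fb) (hf : PrimFrame v0 ret pa tb numTokens p toks { p with pos := q } toks v) (hrax : v.reg .rax = 0) :
    Reach n v (ScanPost binFS binFS.usePrim v0 ret pa tb numTokens toks JSMN_ERROR_NOMEM p toks) := by
  have hW := hp.toksW
  v3_open hp hf hW
  j6f_bin
  have hcode := JsmnFS.tjfs_jsmn_parse_primitive_code hf_img
  have hplt : p.pos < 2 ^ 32 := hp_parser_pos ▸ User.Mem.readLE4_lt _ _
  v3_walk hcode hp.call.fetch [] until [0x10013a]
  refine prim_tail hp (by simp) (by v3_regnorm; rfl) ?_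
  prims_frame_f
  exact ⟨by v3_read, by v3_frame hf_parser_toknext, by v3_frame hf_parser_toksuper⟩

/-- After `jsmn_fill_token` (r12 = `&tokens[i]`): `token->parent = parser->toksuper; parser->pos--; return 0`. -/
theorem prim_dec {ts ts2 : Tokens} {i : Nat} (hp : ScanPre binFS n binFS.prim binFS.usePrim v0 ret pa jsA tb js numTokens p (some ts))
    {v : User.State} (hrip : v.rip = 0x100114) (hf : PrimFrame v0 ret pa tb numTokens p (some ts) pc (some ts2) v)
    (hr12 : v.reg .r12 = tokAddr Config.strictLinks tb i) (hi : i < numTokens) :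
    Reach n v (ScanPost binFS binFS.usePrim v0 ret pa tb numTokens (some ts) 0 { pc with pos := u32 ((pc.pos : Int) - 1) }
      (some (ts2.set i { ts2.getD i default with parent := pc.toksuper }))) := by
  have hR := hp.toksRegion
  v3_open hp hf hR
  j6f_bin
  obtain ⟨htb0, hlen2, hts2⟩ := hf_toksArg
  simp only [toksBytes, tokSize_strictLinks] at *
  have hcode := JsmnFS.tjfs_jsmn_parse_primitive_code hf_img
  have hqlt : pc.pos < 2 ^ 32 := hf_parser_pos ▸ User.Mem.readLE4_lt _ _
  obtain ⟨hsup, hsup1, hsup2⟩ := hf_parser_toksuper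
  have hsuplt := u32_lt pc.toksuper
  have haddr : tokAddr Config.strictLinks tb i = tb + UInt64.ofNat (20 * i) := by unfold tokAddr; rw [tokSize_strictLinks]
  rw [haddr] at hr12
  have hi2 : i < ts2.length := hlen2 ▸ hi
  have hmul := tokSize_mul_le Config.strictLinks hi2
  rw [tokSize_strictLinks, hlen2] at hmul
  v3_walk hcode hp.call.fetch [] until [0x10013a]
  have hpos : u32 ((pc.pos : Int) - 1) = (Word.low .w32 (UInt64.ofNat pc.pos - 1)).toNat := by unfold u32; v3_omega
  have hraw : (Word.low .w32 (UInt64.ofNat (u32 pc.toksuper))).toNat = u32 pc.toksuper := by v3_omega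
  rw [hraw]
  have ht0 := hts2.getD i hi2
  rw [haddr] at ht0
  have ht0t := ht0.type
  have ht0s := ht0.start
  have ht0e := ht0.«end»
  have ht0z := ht0.size
  refine prim_tail hp (by simp) (by v3_regnorm; rfl) ⟨by v3_regnorm; exact hf_rbx, by v3_regnorm; exact hf_rbp, by v3_regnorm; exact hf_rsp,
    by v3_regnorm; exact hf_r13, by v3_regnorm; exact hf_r14, by v3_regnorm; exact hf_r15, by v3_frame hf_slotR12, by v3_frame hf_slotRbp,
    by v3_frame hf_slotRbx, by v3_frame hf_retA, by v3_frame hf_img,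
    ⟨by rw [hpos]; v3_read, by v3_frame hf_parser_toknext, holds32_read (by v3_read) ⟨rfl, hsup1, hsup2⟩⟩, ⟨htb0, by rw [List.length_set]; exact hlen2, ?_⟩,
    rfl, by simp only [toksBytes, tokSize_strictLinks]; v3_same⟩
  v3_memnorm
  refine TokensAt.update hts2 hi2 (by rw [tokSize_strictLinks, hlen2]; v3_omega) (by rw [tokSize_strictLinks]; v3_eqon)
    (by rw [tokSize_strictLinks, hlen2]; v3_eqon) ?_
  rw [haddr]
  exact ⟨by v3_frame ht0t, by v3_frame ht0s, by v3_frame ht0e, by v3_frame ht0z, fun _ => holds32_read (by v3_read) ⟨rfl, hsup1, hsup2⟩⟩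

end FS
end J6
end X86
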